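-- pv_equiv track=rewrite | github.com/nikunjpanchal22/code_clone_classification | python_t4_full/Clone_231.py | get_most_ooo_word
-- ===== SOURCE A (Python) =====
-- def get_most_ooo_word(words_string):
--     words_array = words_string.split()
--     max_o_count = words_array[0].count('o')
--     most_occuring_words = [words_array[0]]
--     for word in words_array[1:]:
--         current_occurance_of_o = word.count('o')
--         if current_occurance_of_o > max_o_count:
--             max_o_count = current_occurance_of_o
--             most_occuring_words = [word]
--         elif current_occurance_of_o == max_o_count:
--             most_occuring_words.append(word)
--     return most_occuring_words
-- ===== SOURCE B (Python) =====
-- def get_most_ooo_word(words_string):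
--     words = words_string.split()
--     best = words[0].count('o')
--     for w in words[1:]:
--         best = max(best, w.count('o'))
--     return [w for w in words if w.count('o') == best]
-- ===== Notes on version B (the rewrite author's own statement) =====
-- stated objective: simpler
-- what changed: Two clearly separated passes (compute the maximum 'o'-count, then filter the word list for that count) instead of one interleaved pass that maintains and resets a tie list.
import Mathlib
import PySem

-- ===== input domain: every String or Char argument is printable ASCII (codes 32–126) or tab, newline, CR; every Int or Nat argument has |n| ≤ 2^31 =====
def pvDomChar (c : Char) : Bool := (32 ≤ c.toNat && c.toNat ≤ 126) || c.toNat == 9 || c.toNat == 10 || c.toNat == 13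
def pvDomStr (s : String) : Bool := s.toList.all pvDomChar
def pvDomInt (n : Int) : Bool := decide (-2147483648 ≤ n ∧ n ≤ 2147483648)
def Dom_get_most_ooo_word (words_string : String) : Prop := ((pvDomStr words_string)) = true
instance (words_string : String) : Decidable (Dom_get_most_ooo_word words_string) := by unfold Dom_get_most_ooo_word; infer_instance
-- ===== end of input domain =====

-- B computes the maximum 'o'-count in one pass and then filters the word list for it,
-- instead of A's single interleaved pass maintaining and resetting a tie list (objective: simpler).

-- ===== PORT A =====
def get_most_ooo_word (words_string : String) : List String :=
  let words_array := PySem.Str.split₀ words_string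
  match words_array with
  | [] => []  -- unreachable under Pre_: Python A raises IndexError here
  | w0 :: rest =>
    let st := rest.foldl (fun (st : Nat × List String) word =>
        let current_occurance_of_o := PySem.Str.count word "o"
        if st.1 < current_occurance_of_o then (current_occurance_of_o, [word])
        else if current_occurance_of_o = st.1 then (st.1, st.2 ++ [word])
        else st) (PySem.Str.count w0 "o", [w0])
    st.2

-- ===== PORT B =====
def get_most_ooo_word_alt (words_string : String) : List String :=
  match PySem.Str.split₀ words_string with
  | [] => []  -- unreachable under Pre_: Python B raises IndexError here
  | w0 :: rest =>
    let best := rest.foldl (fun m w => max m (PySem.Str.count w "o")) (PySem.Str.count w0 "o")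
    (w0 :: rest).filter (fun w => PySem.Str.count w "o" == best)

-- ===== PRECONDITION & SPEC =====
-- Pre_ excludes exactly the inputs with no words (empty/whitespace-only), on which both
-- Pythons raise IndexError at words[0].
def Pre_get_most_ooo_word (words_string : String) : Prop :=
  PySem.Str.split₀ words_string ≠ []
instance (words_string : String) : Decidable (Pre_get_most_ooo_word words_string) := by
  unfold Pre_get_most_ooo_word; infer_instance
def pvWitness_get_most_ooo_word : String := "foo boo ba"

def Spec_get_most_ooo_word (words_string : String) (out : List String) : Prop := out = get_most_ooo_word_alt words_string
instance (words_string : String) (out : List String) : Decidable (Spec_get_most_ooo_word words_string out) := by unfold Spec_get_most_ooo_word; infer_instance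

-- ===== CLAIM (what is proved, stated in full; the proofs are below) =====
def Claim_equal_get_most_ooo_word : Prop := ∀ (words_string : String), Dom_get_most_ooo_word words_string → Pre_get_most_ooo_word words_string → Spec_get_most_ooo_word words_string (get_most_ooo_word words_string)

-- ===== LEMMAS AND PROOFS =====

-- the maximum-fold dominates its seed (stated for an arbitrary count function f)
lemma seed_le_foldl_max (f : String → Nat) (rest : List String) (m : Nat) :
    m ≤ rest.foldl (fun a w => max a (f w)) m := by
  induction rest generalizing m with
  | nil => simp
  | cons w rest ih =>
    simpa [List.foldl] using le_trans (le_max_left m (f w)) (ih _)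

-- characterisation of A's loop: its tie list is a filter at the running maximum
lemma loopA_eq (f : String → Nat) (rest : List String) (m : Nat) (acc : List String) :
    rest.foldl (fun (st : Nat × List String) word =>
        if st.1 < f word then (f word, [word])
        else if f word = st.1 then (st.1, st.2 ++ [word])
        else st) (m, acc)
    = (rest.foldl (fun a w => max a (f w)) m,
       (if m = rest.foldl (fun a w => max a (f w)) m then acc else [])
        ++ rest.filter (fun w => f w == rest.foldl (fun a w => max a (f w)) m)) := by
  induction rest generalizing m acc with
  | nil => simp
  | cons w rest ih =>
    simp only [List.foldl, List.filter_cons]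
    by_cases h1 : m < f w
    · have hm : max m (f w) = f w := by omega
      have hle := seed_le_foldl_max f rest (f w)
      rw [if_pos h1, ih]
      simp only [hm]
      have hne : ¬ m = rest.foldl (fun a w => max a (f w)) (f w) := by omega
      rw [if_neg hne]
      by_cases h2 : f w = rest.foldl (fun a w => max a (f w)) (f w)
      · rw [if_pos h2, if_pos (beq_iff_eq.mpr h2), List.singleton_append, List.nil_append]
      · rw [if_neg h2, if_neg (fun hb => h2 (beq_iff_eq.mp hb)), List.nil_append]
    · have hm : max m (f w) = m := by omega
      by_cases h2 : f w = m
      · rw [if_neg h1, if_pos h2, ih]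
        simp only [hm]
        by_cases h3 : m = rest.foldl (fun a w => max a (f w)) m
        · simp [h2, ← h3]
        · have : ¬ (f w == rest.foldl (fun a w => max a (f w)) m) = true := by
            simp [beq_iff_eq, h2]; omega
          simp [h3, this]
      · rw [if_neg h1, if_neg h2, ih]
        simp only [hm]
        have hle := seed_le_foldl_max f rest m
        have : ¬ (f w == rest.foldl (fun a w => max a (f w)) m) = true := by
          simp [beq_iff_eq]; omega
        simp [this]

-- ===== VERDICT (by name: the statement is the Claim_ definition above) =====
theorem get_most_ooo_word_spec : Claim_equal_get_most_ooo_word := by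
  intro s _ _
  unfold Spec_get_most_ooo_word get_most_ooo_word get_most_ooo_word_alt
  cases hsp : PySem.Str.split₀ s with
  | nil => rfl
  | cons w0 rest =>
    simp only
    rw [show (rest.foldl (fun (st : Nat × List String) word =>
          let current_occurance_of_o := PySem.Str.count word "o";
          if st.1 < current_occurance_of_o then (current_occurance_of_o, [word])
          else if current_occurance_of_o = st.1 then (st.1, st.2 ++ [word])
          else st) (PySem.Str.count w0 "o", [w0]))
        = rest.foldl (fun (st : Nat × List String) word =>
          if st.1 < (fun w => PySem.Str.count w "o") word then ((fun w => PySem.Str.count w "o") word, [word])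
          else if (fun w => PySem.Str.count w "o") word = st.1 then (st.1, st.2 ++ [word])
          else st) (PySem.Str.count w0 "o", [w0]) from rfl,
       loopA_eq (fun w => PySem.Str.count w "o"), List.filter_cons]
    by_cases h : PySem.Str.count w0 "o"
        = rest.foldl (fun a w => max a (PySem.Str.count w "o")) (PySem.Str.count w0 "o")
    · rw [if_pos h, if_pos (beq_iff_eq.mpr h), List.singleton_append]
    · rw [if_neg h, if_neg (fun hb => h (beq_iff_eq.mp hb)), List.nil_append]
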